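-- pv_equiv track=rewrite | github.com/PushpenderIndia/browsegenie | universal_scraper/core/web_ui/providers.py | _sort_models
-- ===== SOURCE A (Python) =====
-- from typing import Any, Dict, List
--
-- _PREFERRED_PREFIXES = (
--     "gemini-2.5", "gemini-2.0",
--     "gpt-4o", "gpt-4-turbo",
--     "claude-opus-4", "claude-sonnet-4", "claude-haiku-4",
--     "claude-3-5", "claude-3-opus",
-- )
--
-- def _sort_models(models: List[str]) -> List[str]:
--     """Sort models: preferred prefixes first, then alphabetical."""
--     def _key(m: str):
--         lm = m.lower()
--         for i, prefix in enumerate(_PREFERRED_PREFIXES):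
--             if lm.startswith(prefix):
--                 return (0, i, m)
--         return (1, 999, m)
--
--     return sorted(models, key=_key)
-- ===== SOURCE B (Python) =====
-- from typing import List
--
-- _PREFERRED_PREFIXES = (
--     "gemini-2.5", "gemini-2.0",
--     "gpt-4o", "gpt-4-turbo",
--     "claude-opus-4", "claude-sonnet-4", "claude-haiku-4",
--     "claude-3-5", "claude-3-opus",
-- )
--
-- def _sort_models(models: List[str]) -> List[str]:
--     """Partition into per-prefix buckets (first matching prefix wins) plus an
--     'others' bucket, sort each bucket alphabetically, and concatenate."""
--     def _first_pref(m: str):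
--         lm = m.lower()
--         for i, prefix in enumerate(_PREFERRED_PREFIXES):
--             if lm.startswith(prefix):
--                 return i
--         return None
--
--     out: List[str] = []
--     for i in range(len(_PREFERRED_PREFIXES)):
--         out.extend(sorted(m for m in models if _first_pref(m) == i))
--     out.extend(sorted(m for m in models if _first_pref(m) is None))
--     return out
-- ===== Notes on version B (the rewrite author's own statement) =====
-- stated objective: alternative
-- what changed: Replaces the single composite-key sort (tuple key (flag, prefix-index, name)) by partition-into-buckets per preferred prefix (first match wins) plus an others bucket, each bucket plainly sorted and the buckets concatenated in prefix order.
import Mathlib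
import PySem

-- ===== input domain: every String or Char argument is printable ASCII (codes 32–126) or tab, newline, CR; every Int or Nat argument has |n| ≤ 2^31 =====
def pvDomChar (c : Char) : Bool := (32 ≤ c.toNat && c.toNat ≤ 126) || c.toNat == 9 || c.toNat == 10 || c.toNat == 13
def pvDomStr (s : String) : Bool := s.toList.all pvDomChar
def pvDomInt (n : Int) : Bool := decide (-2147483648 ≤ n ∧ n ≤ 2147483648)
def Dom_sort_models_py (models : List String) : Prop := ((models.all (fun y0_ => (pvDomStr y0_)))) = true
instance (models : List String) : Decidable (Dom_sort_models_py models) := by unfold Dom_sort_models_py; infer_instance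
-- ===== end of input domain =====

-- B replaces A's single composite-key sort by a partition into per-prefix buckets (first
-- matching prefix wins) plus an 'others' bucket, each bucket plainly sorted and concatenated
-- in prefix order (alternative decomposition, same cost class).

def pvPrefixes : List String :=
  ["gemini-2.5", "gemini-2.0",
   "gpt-4o", "gpt-4-turbo",
   "claude-opus-4", "claude-sonnet-4", "claude-haiku-4",
   "claude-3-5", "claude-3-opus"]

-- ===== PORT A =====
-- A's _key: scan _PREFERRED_PREFIXES, first match gives (0, i, m), no match gives (1, 999, m).
-- The first two tuple components are encoded order-isomorphically as the single Int flag*1000+i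
-- (match at i → i with 0 ≤ i < 9 < 1999; no match → 1*1000+999 = 1999); the third component m
-- is sorted2's second key, so the comparison order is exactly Python's tuple order.
def pvKeyLoop (prefs : List String) (i : Int) (lm : String) : Int :=
  match prefs with
  | [] => 1999
  | p :: rest => if PySem.Str.startswith lm p then i else pvKeyLoop rest (i + 1) lm

def pvKeyA (m : String) : Int := pvKeyLoop pvPrefixes 0 (PySem.Str.lower m)

def sort_models_py (models : List String) : List String :=
  PySem.List.sorted2 models pvKeyA (fun m => m)

-- ===== PORT B =====
-- B's _first_pref: index of the first preferred prefix the lowercased model starts with, else None.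
def pvFirstPrefLoop (prefs : List String) (i : Int) (lm : String) : Option Int :=
  match prefs with
  | [] => none
  | p :: rest => if PySem.Str.startswith lm p then some i else pvFirstPrefLoop rest (i + 1) lm

def pvFirstPref (m : String) : Option Int := pvFirstPrefLoop pvPrefixes 0 (PySem.Str.lower m)

-- B's loop 'for i in range(len(_PREFERRED_PREFIXES)): out.extend(sorted(bucket i))' (len = 9),
-- then 'out.extend(sorted(others))'.
def sort_models_py_alt (models : List String) : List String :=
  ((PySem.List.pyRange 0 9 1).foldl
    (fun acc i =>
      acc ++ PySem.List.sorted (models.filter (fun m => pvFirstPref m == some i)) (fun x => x)) [])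
  ++ PySem.List.sorted (models.filter (fun m => pvFirstPref m == none)) (fun x => x)

-- ===== PRECONDITION & SPEC =====
def Spec_sort_models_py (models : List String) (out : List String) : Prop := out = sort_models_py_alt models
instance (models : List String) (out : List String) : Decidable (Spec_sort_models_py models out) := by unfold Spec_sort_models_py; infer_instance

-- ===== CLAIM (what is proved, stated in full; the proofs are below) =====
def Claim_equal_sort_models_py : Prop := ∀ (models : List String), Dom_sort_models_py models → Spec_sort_models_py models (sort_models_py models)

-- ===== LEMMAS AND PROOFS =====

-- A's key equals B's bucket index (1999 for the 'others' bucket)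
theorem pvKeyLoop_eq_firstPrefLoop (prefs : List String) (i : Int) (lm : String) :
    pvKeyLoop prefs i lm = (pvFirstPrefLoop prefs i lm).getD 1999 := by
  induction prefs generalizing i with
  | nil => simp [pvKeyLoop, pvFirstPrefLoop]
  | cons p rest ih =>
    simp only [pvKeyLoop, pvFirstPrefLoop]
    split <;> simp [ih]

theorem pvKeyA_eq (m : String) : pvKeyA m = (pvFirstPref m).getD 1999 := by
  simp [pvKeyA, pvFirstPref, pvKeyLoop_eq_firstPrefLoop]

theorem pvFirstPrefLoop_bounds (prefs : List String) (i j : Int) (lm : String)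
    (h : pvFirstPrefLoop prefs i lm = some j) : i ≤ j ∧ j < i + prefs.length := by
  induction prefs generalizing i with
  | nil => simp [pvFirstPrefLoop] at h
  | cons p rest ih =>
    simp only [pvFirstPrefLoop] at h
    split at h
    · simp only [Option.some.injEq] at h
      simp only [List.length_cons, ← h]
      omega
    · have := ih (i + 1) h
      simp only [List.length_cons]
      omega

theorem pvFirstPref_bounds (m : String) (j : Int) (h : pvFirstPref m = some j) :
    0 ≤ j ∧ j < 9 := by
  have := pvFirstPrefLoop_bounds pvPrefixes 0 j (PySem.Str.lower m) h
  simpa [pvPrefixes] using this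

-- A's sorted2 (tuple key) is sorted with the corresponding lexicographic key
theorem pv_foldl_insertBy_congr (f g : String → String → Bool) (h : ∀ a b, f a b = g a b)
    (xs acc : List String) :
    xs.foldl (fun acc x => PySem.List.insertBy f x acc) acc
      = xs.foldl (fun acc x => PySem.List.insertBy g x acc) acc := by
  have : f = g := funext fun a => funext fun b => h a b
  rw [this]

theorem pv_lex_lt_iff (k : String → Int) (a b : String) :
    toLex (k a, a) < toLex (k b, b) ↔ k a < k b ∨ (k a = k b ∧ a < b) := by
  rw [Prod.Lex.lt_iff]; exact Iff.rfl

theorem pv_lex_le_iff (k : String → Int) (a b : String) :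
    toLex (k a, a) ≤ toLex (k b, b) ↔ k a < k b ∨ (k a = k b ∧ a ≤ b) := by
  rw [Prod.Lex.le_iff]; exact Iff.rfl

theorem pv_sorted2_lex (xs : List String) (k : String → Int) :
    PySem.List.sorted2 xs k (fun m => m)
      = PySem.List.sorted xs (fun m => toLex (k m, m)) := by
  have hpt : ∀ a b : String,
      (decide (k a < k b) || (!decide (k b < k a) && decide (a < b)))
        = decide (toLex (k a, a) < toLex (k b, b)) := by
    intro a b
    by_cases h1 : k a < k b
    · simp [h1, pv_lex_lt_iff]
    · by_cases h2 : k b < k a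
      · have hn : ¬ (toLex (k a, a) < toLex (k b, b)) := by
          rw [pv_lex_lt_iff]
          rintro (h | ⟨he, _⟩) <;> omega
        simp [h1, h2, hn]
      · have heq : k a = k b := by omega
        by_cases h3 : a < b
        · have hl : toLex (k a, a) < toLex (k b, b) := (pv_lex_lt_iff k a b).mpr (Or.inr ⟨heq, h3⟩)
          simp [h1, h2, h3, hl]
        · have hn : ¬ (toLex (k a, a) < toLex (k b, b)) := by
            rw [pv_lex_lt_iff]
            rintro (h | ⟨_, hs⟩)
            · omega
            · exact h3 hs
          simp [h1, h2, h3, hn]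
  exact pv_foldl_insertBy_congr _ _ hpt xs []

-- the ten buckets, in output order
def pvIdxList : List (Option Int) :=
  [some 0, some 1, some 2, some 3, some 4, some 5, some 6, some 7, some 8, none]

def pvBucket (models : List String) (o : Option Int) : List String :=
  PySem.List.sorted (models.filter (fun m => pvFirstPref m == o)) (fun x => x)

theorem pv_alt_eq_flatMap (models : List String) :
    sort_models_py_alt models = pvIdxList.flatMap (pvBucket models) := by
  simp [sort_models_py_alt, pvIdxList, pvBucket,
    show PySem.List.pyRange 0 9 1 = [0, 1, 2, 3, 4, 5, 6, 7, 8] from rfl, List.foldl]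

theorem pv_count_bucket (models : List String) (o : Option Int) (a : String) :
    List.count a (pvBucket models o)
      = if pvFirstPref a = o then List.count a models else 0 := by
  have hperm := PySem.List.sorted_perm (models.filter (fun m => pvFirstPref m == o)) (fun x : String => x) false
  rw [pvBucket, hperm.count_eq]
  by_cases h : pvFirstPref a = o
  · rw [List.count_filter (by simp [h]), if_pos h]
  · rw [if_neg h, List.count_eq_zero]
    simp [List.mem_filter, h]

theorem pv_flatMap_perm (models : List String) :
    (pvIdxList.flatMap (pvBucket models)).Perm models := by
  rw [List.perm_iff_count]
  intro a
  rw [List.count_flatMap]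
  simp only [pvIdxList, List.map_cons, List.map_nil, Function.comp, pv_count_bucket, List.sum_cons,
    List.sum_nil]
  rcases h : pvFirstPref a with _ | j
  · simp
  · obtain ⟨hb1, hb2⟩ := pvFirstPref_bounds a j h
    interval_cases j <;> simp

theorem pv_key_le_of_mem (models : List String) (o o' : Option Int)
    (hlt : (o.getD 1999 : Int) < o'.getD 1999)
    (x y : String) (hx : x ∈ pvBucket models o) (hy : y ∈ pvBucket models o') :
    toLex (pvKeyA x, x) ≤ toLex (pvKeyA y, y) := by
  rw [pvBucket, PySem.List.mem_sorted, List.mem_filter] at hx hy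
  have hox : pvFirstPref x = o := by simpa using hx.2
  have hoy : pvFirstPref y = o' := by simpa using hy.2
  rw [pv_lex_le_iff]
  left
  rw [pvKeyA_eq, pvKeyA_eq, hox, hoy]
  exact hlt

theorem pv_flatMap_pairwise (models : List String) :
    (pvIdxList.flatMap (pvBucket models)).Pairwise
      (fun x y => toLex (pvKeyA x, x) ≤ toLex (pvKeyA y, y)) := by
  rw [List.pairwise_flatMap]
  constructor
  · intro o _
    have hp := PySem.List.sorted_pairwise (models.filter (fun m => pvFirstPref m == o)) (fun x : String => x)
    refine List.Pairwise.imp_of_mem ?_ hp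
    intro x y hx hy hle
    have hox : pvFirstPref x = o := by
      have := (List.mem_filter.mp ((PySem.List.mem_sorted _ _ _ _).mp hx)).2
      simpa using this
    have hoy : pvFirstPref y = o := by
      have := (List.mem_filter.mp ((PySem.List.mem_sorted _ _ _ _).mp hy)).2
      simpa using this
    rw [pv_lex_le_iff]
    right
    exact ⟨by rw [pvKeyA_eq, pvKeyA_eq, hox, hoy], hle⟩
  · have hrank : pvIdxList.Pairwise (fun o o' => (o.getD 1999 : Int) < o'.getD 1999) := by
      decide
    refine List.Pairwise.imp_of_mem ?_ hrank
    intro o o' _ _ hlt x hx y hy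
    exact pv_key_le_of_mem models o o' hlt x y hx hy

theorem pv_lex_key_injective :
    Function.Injective (fun m : String => toLex (pvKeyA m, m)) := by
  intro a b h
  exact congrArg (fun x => (ofLex x).2) h

-- ===== VERDICT (by name: the statement is the Claim_ definition above) =====
theorem sort_models_py_spec : Claim_equal_sort_models_py := by
  intro models _
  show sort_models_py models = sort_models_py_alt models
  rw [sort_models_py, pv_sorted2_lex, pv_alt_eq_flatMap]
  refine PySem.List.eq_of_perm_of_pairwise_le_of_injective
    (fun m : String => toLex (pvKeyA m, m)) pv_lex_key_injective
    ?_ ?_ (pv_flatMap_pairwise models)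
  · exact (PySem.List.sorted_perm models _ false).trans (pv_flatMap_perm models).symm
  · exact PySem.List.sorted_pairwise models _
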